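-- pv_equiv track=rewrite | github.com/StevenXoFk/Tarea-taller-Tkinter | convertidor.py | base8_a_base3
-- ===== SOURCE A (Python) =====
-- def base8_a_base3(numero):
--     decimal = 0
--     exponente = 0
--
--     while numero > 0:
--         digitos = numero % 10
--         decimal += digitos * (8 ** exponente)
--         numero //= 10
--         exponente += 1
--
--     binario = 0
--     valor = 1
--     while decimal > 0:
--         todo = decimal % 3
--         binario += todo * valor
--         decimal //= 3
--         valor *= 10
--
--     return binario
-- ===== SOURCE B (Python) =====
-- def base8_a_base3(numero):
--     # Phase 1: Horner's rule over the decimal string, MSB first (int(ch) accepts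
--     # digit values 8 and 9, exactly as A's %10 extraction does).
--     if numero <= 0:
--         return 0
--     decimal = 0
--     for ch in str(numero):
--         decimal = decimal * 8 + int(ch)
--     # Phase 2: collect base-3 digits LSB-first, then pack them into a decimal
--     # number by Horner's rule over the reversed list.
--     digits = []
--     while decimal > 0:
--         digits.append(decimal % 3)
--         decimal //= 3
--     out = 0
--     for d in reversed(digits):
--         out = out * 10 + d
--     return out
-- ===== Notes on version B (the rewrite author's own statement) =====
-- stated objective: alternative
-- what changed: Phase 1 becomes Horner's rule over str(numero) (MSB-first accumulator, guarded by numero <= 0) instead of LSB-first %10 extraction with an 8**exponente power accumulator, and phase 2 builds the base-3 digit list and packs it back-to-front by a base-10 Horner fold instead of maintaining a running valor power.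
import Mathlib
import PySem

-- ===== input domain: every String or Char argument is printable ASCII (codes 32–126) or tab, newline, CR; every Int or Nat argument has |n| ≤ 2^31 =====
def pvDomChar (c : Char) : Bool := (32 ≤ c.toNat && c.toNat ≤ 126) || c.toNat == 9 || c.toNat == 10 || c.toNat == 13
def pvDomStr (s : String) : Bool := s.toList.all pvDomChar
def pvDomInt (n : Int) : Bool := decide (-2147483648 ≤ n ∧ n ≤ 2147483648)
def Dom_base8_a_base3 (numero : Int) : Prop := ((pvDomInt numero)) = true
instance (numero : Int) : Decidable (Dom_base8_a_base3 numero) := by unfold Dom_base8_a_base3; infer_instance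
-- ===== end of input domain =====

-- B rewrites phase 1 as Horner's rule over str(numero) (MSB-first) and phase 2 as a
-- base-3 digit list packed back-to-front by Horner's rule (objective: alternative
-- decomposition, same cost).


-- termination helper for the `//=` loops of both ports
lemma pvDivLt (a b : Int) (ha : 0 < a) (hb : 1 < b) : 0 ≤ a / b ∧ a / b < a := by
  have h1 := Int.mul_ediv_add_emod a b
  have h2 := Int.emod_nonneg a (by omega : b ≠ 0)
  have h3 := Int.emod_lt_of_pos a (by omega : 0 < b)
  have h4 : 0 ≤ a / b := Int.ediv_nonneg (by omega) (by omega)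
  exact ⟨h4, by nlinarith [h4]⟩

-- ===== PORT A =====
-- first while loop: decimal/exponente accumulation over numero % 10, numero //= 10
def pvPhase1A (numero decimal : Int) (exponente : Nat) : Int :=
  if h : 0 < numero then
    pvPhase1A (PySem.Int.floordiv numero 10) (decimal + PySem.Int.mod numero 10 * 8 ^ exponente) (exponente + 1)
  else decimal
termination_by numero.toNat
decreasing_by
  have h1 : PySem.Int.floordiv numero 10 = numero / 10 := PySem.Int.floordiv_eq_ediv_of_pos (by omega)
  have h2 := pvDivLt numero 10 h (by omega)
  rw [h1]; omega

-- second while loop: binario/valor accumulation over decimal % 3, decimal //= 3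
def pvPhase2A (decimal binario valor : Int) : Int :=
  if h : 0 < decimal then
    pvPhase2A (PySem.Int.floordiv decimal 3) (binario + PySem.Int.mod decimal 3 * valor) (valor * 10)
  else binario
termination_by decimal.toNat
decreasing_by
  have h1 : PySem.Int.floordiv decimal 3 = decimal / 3 := PySem.Int.floordiv_eq_ediv_of_pos (by omega)
  have h2 := pvDivLt decimal 3 h (by omega)
  rw [h1]; omega

def base8_a_base3 (numero : Int) : Int :=
  pvPhase2A (pvPhase1A numero 0 0) 0 1

-- ===== PORT B =====
-- int(ch): exact for the decimal digit characters produced by str(n) for n > 0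
def pvHornerStep (acc : Int) (c : Char) : Int := acc * 8 + ((c.toNat : Int) - 48)

-- the while loop collecting base-3 digits LSB-first (digits.append(decimal % 3); decimal //= 3)
def pvDigits3 (decimal : Int) : List Int :=
  if h : 0 < decimal then
    PySem.Int.mod decimal 3 :: pvDigits3 (PySem.Int.floordiv decimal 3)
  else []
termination_by decimal.toNat
decreasing_by
  have h1 : PySem.Int.floordiv decimal 3 = decimal / 3 := PySem.Int.floordiv_eq_ediv_of_pos (by omega)
  have h2 := pvDivLt decimal 3 h (by omega)
  rw [h1]; omega

def base8_a_base3_alt (numero : Int) : Int :=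
  if numero ≤ 0 then 0
  else
    let decimal := (PySem.Int.toChars numero).foldl pvHornerStep 0
    (pvDigits3 decimal).reverse.foldl (fun out d => out * 10 + d) 0

-- ===== PRECONDITION & SPEC =====
def Spec_base8_a_base3 (numero : Int) (out : Int) : Prop := out = base8_a_base3_alt numero
instance (numero : Int) (out : Int) : Decidable (Spec_base8_a_base3 numero out) := by unfold Spec_base8_a_base3; infer_instance

-- ===== CLAIM (what is proved, stated in full; the proofs are below) =====
def Claim_equal_base8_a_base3 : Prop := ∀ (numero : Int), Dom_base8_a_base3 numero → Spec_base8_a_base3 numero (base8_a_base3 numero)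

-- ===== LEMMAS AND PROOFS =====

lemma pvPhase1A_nonpos (n d : Int) (e : Nat) (h : ¬ 0 < n) : pvPhase1A n d e = d := by
  rw [pvPhase1A]; simp [h]

-- A's first loop in accumulator-free form
lemma pvPhase1A_acc (k : Nat) : ∀ n : Int, n.toNat ≤ k → ∀ d : Int, ∀ e : Nat,
    pvPhase1A n d e = d + 8 ^ e * pvPhase1A n 0 0 := by
  induction k with
  | zero =>
    intro n hn d e
    have h : ¬ 0 < n := by omega
    rw [pvPhase1A_nonpos n d e h, pvPhase1A_nonpos n 0 0 h]
    ring
  | succ k ih =>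
    intro n hn d e
    by_cases h : 0 < n
    · have h1 : PySem.Int.floordiv n 10 = n / 10 := PySem.Int.floordiv_eq_ediv_of_pos (by omega)
      have h2 := pvDivLt n 10 h (by omega)
      have hle : (PySem.Int.floordiv n 10).toNat ≤ k := by rw [h1]; omega
      rw [pvPhase1A]
      conv_rhs => rw [pvPhase1A]
      simp only [h, dif_pos]
      rw [ih _ hle (d + PySem.Int.mod n 10 * 8 ^ e) (e + 1),
          ih _ hle (0 + PySem.Int.mod n 10 * 8 ^ 0) (0 + 1)]
      ring
    · rw [pvPhase1A_nonpos n d e h, pvPhase1A_nonpos n 0 0 h]; ring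

lemma pvPhase1A_rec (n : Int) (h : 0 < n) :
    pvPhase1A n 0 0 = PySem.Int.mod n 10 + 8 * pvPhase1A (PySem.Int.floordiv n 10) 0 0 := by
  rw [pvPhase1A]
  simp only [h, dif_pos]
  rw [pvPhase1A_acc (PySem.Int.floordiv n 10).toNat _ le_rfl]
  ring

-- the value packed by B's final Horner loop
def pvPack (d : Int) : Int := (pvDigits3 d).reverse.foldl (fun out t => out * 10 + t) 0

-- A's second loop computes exactly B's packed value
lemma pvPhase2A_eq (k : Nat) : ∀ d : Int, d.toNat ≤ k → ∀ b v : Int,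
    pvPhase2A d b v = b + v * pvPack d := by
  induction k with
  | zero =>
    intro d hd b v
    have h : ¬ 0 < d := by omega
    rw [pvPhase2A, pvPack, pvDigits3]
    simp [h]
  | succ k ih =>
    intro d hd b v
    by_cases h : 0 < d
    · have h1 : PySem.Int.floordiv d 3 = d / 3 := PySem.Int.floordiv_eq_ediv_of_pos (by omega)
      have h2 := pvDivLt d 3 h (by omega)
      have hle : (PySem.Int.floordiv d 3).toNat ≤ k := by rw [h1]; omega
      rw [pvPhase2A]
      simp only [h, dif_pos]
      rw [ih _ hle]
      have hpack : pvPack d = 10 * pvPack (PySem.Int.floordiv d 3) + PySem.Int.mod d 3 := by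
        rw [pvPack, pvDigits3]
        simp only [h, dif_pos, List.reverse_cons, List.foldl_append, List.foldl_cons, List.foldl_nil]
        rw [pvPack]
        ring
      rw [hpack]; ring
    · rw [pvPhase2A, pvPack, pvDigits3]
      simp [h]

-- one unfolding step of Nat.toDigitsCore, recursive case
lemma pvTDC_succ (f n : Nat) (ds : List Char) (h : n / 10 ≠ 0) :
    Nat.toDigitsCore 10 (f + 1) n ds = Nat.toDigitsCore 10 f (n / 10) (Nat.digitChar (n % 10) :: ds) := by
  simp [Nat.toDigitsCore, h]

-- one unfolding step of Nat.toDigitsCore, final case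
lemma pvTDC_succ0 (f n : Nat) (ds : List Char) (h : n / 10 = 0) :
    Nat.toDigitsCore 10 (f + 1) n ds = Nat.digitChar (n % 10) :: ds := by
  simp [Nat.toDigitsCore, h]

-- Nat.toDigitsCore peels its accumulator off as an append
lemma pvTDC_append (f : Nat) : ∀ n : Nat, ∀ ds : List Char,
    Nat.toDigitsCore 10 f n ds = Nat.toDigitsCore 10 f n [] ++ ds := by
  induction f with
  | zero => intro n ds; simp [Nat.toDigitsCore]
  | succ f ih =>
    intro n ds
    by_cases h : n / 10 = 0
    · rw [pvTDC_succ0 f n ds h, pvTDC_succ0 f n [] h]; simp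
    · rw [pvTDC_succ f n ds h, pvTDC_succ f n [] h,
          ih (n / 10) (Nat.digitChar (n % 10) :: ds), ih (n / 10) [Nat.digitChar (n % 10)]]
      simp

-- fuel beyond n does not matter
lemma pvTDC_fuel (k : Nat) : ∀ n : Nat, n ≤ k → ∀ f : Nat, n < f → ∀ ds : List Char,
    Nat.toDigitsCore 10 f n ds = Nat.toDigitsCore 10 (n + 1) n ds := by
  induction k with
  | zero =>
    intro n hn f hf ds
    interval_cases n
    obtain ⟨f', rfl⟩ : ∃ f', f = f' + 1 := ⟨f - 1, by omega⟩
    rw [pvTDC_succ0 f' 0 ds (by omega), pvTDC_succ0 0 0 ds (by omega)]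
  | succ k ih =>
    intro n hn f hf ds
    obtain ⟨f', rfl⟩ : ∃ f', f = f' + 1 := ⟨f - 1, by omega⟩
    by_cases h : n / 10 = 0
    · rw [pvTDC_succ0 f' n ds h, pvTDC_succ0 n n ds h]
    · have hlt : n / 10 < n := Nat.div_lt_self (by omega) (by omega)
      rw [pvTDC_succ f' n ds h, pvTDC_succ n n ds h,
          ih (n / 10) (by omega) f' (by omega), ih (n / 10) (by omega) n (by omega)]

-- str(m)'s recursion, most significant digits first
lemma pvToDigits_step (m : Nat) (h : 10 ≤ m) :
    Nat.toDigits 10 m = Nat.toDigits 10 (m / 10) ++ [Nat.digitChar (m % 10)] := by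
  have h0 : m / 10 ≠ 0 := by
    intro hc
    rcases (Nat.div_eq_zero_iff).mp hc with h' | h' <;> omega
  have hlt : m / 10 < m := Nat.div_lt_self (by omega) (by omega)
  show Nat.toDigitsCore 10 (m + 1) m [] = Nat.toDigitsCore 10 (m / 10 + 1) (m / 10) [] ++ [Nat.digitChar (m % 10)]
  rw [pvTDC_succ m m [] h0,
      pvTDC_append m (m / 10) [Nat.digitChar (m % 10)],
      pvTDC_fuel m (m / 10) (by omega) m (by omega)]

lemma pvDigitChar_val (d : Nat) (h : d < 10) : ((Nat.digitChar d).toNat : Int) - 48 = (d : Int) := by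
  interval_cases d <;> decide

-- B's Horner fold over str(m) equals A's first loop
lemma pvHorner_eq_phase1 (k : Nat) : ∀ m : Nat, m ≤ k →
    (Nat.toDigits 10 m).foldl pvHornerStep 0 = pvPhase1A (m : Int) 0 0 := by
  induction k using Nat.strong_induction_on with
  | _ k ih =>
    intro m hm
    have hmod : PySem.Int.mod (m : Int) 10 = ((m % 10 : Nat) : Int) := by
      exact_mod_cast PySem.Int.mod_natCast m 10
    have hdiv : PySem.Int.floordiv (m : Int) 10 = ((m / 10 : Nat) : Int) := by
      exact_mod_cast PySem.Int.floordiv_natCast m 10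
    by_cases h : 10 ≤ m
    · rw [pvToDigits_step m h, List.foldl_append]
      have hlt : m / 10 < m := Nat.div_lt_self (by omega) (by omega)
      rw [ih (m / 10) (by omega) (m / 10) le_rfl]
      simp only [List.foldl_cons, List.foldl_nil, pvHornerStep]
      rw [pvDigitChar_val (m % 10) (Nat.mod_lt _ (by omega))]
      have hpos : (0 : Int) < (m : Int) := by exact_mod_cast Nat.lt_of_lt_of_le (by omega) h
      rw [pvPhase1A_rec _ hpos, hmod, hdiv]; ring
    · -- m < 10 : str(m) is the single digit character of m
      have hstep : Nat.toDigits 10 m = [Nat.digitChar m] := by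
        show Nat.toDigitsCore 10 (m + 1) m [] = [Nat.digitChar m]
        rw [pvTDC_succ0 m m [] (Nat.div_eq_of_lt (by omega)), Nat.mod_eq_of_lt (by omega)]
      rw [hstep]
      simp only [List.foldl_cons, List.foldl_nil, pvHornerStep]
      rw [pvDigitChar_val m (by omega)]
      by_cases hz : m = 0
      · subst hz
        simp only [Nat.cast_zero]
        rw [pvPhase1A_nonpos 0 0 0 (by omega)]; simp
      · have hpos : (0 : Int) < (m : Int) := by exact_mod_cast Nat.pos_of_ne_zero hz
        rw [pvPhase1A_rec _ hpos, hmod, hdiv,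
            Nat.mod_eq_of_lt (by omega), Nat.div_eq_of_lt (by omega)]
        simp only [Nat.cast_zero]
        rw [pvPhase1A_nonpos 0 0 0 (by omega)]
        ring

-- ===== VERDICT (by name: the statement is the Claim_ definition above) =====
theorem base8_a_base3_spec : Claim_equal_base8_a_base3 := by
  intro numero _
  unfold Spec_base8_a_base3 base8_a_base3 base8_a_base3_alt
  by_cases h : numero ≤ 0
  · rw [pvPhase1A_nonpos numero 0 0 (by omega), pvPhase2A]
    simp [h]
  · simp only [h, if_false]
    have hcast : ((numero.toNat : Nat) : Int) = numero := Int.toNat_of_nonneg (by omega)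
    have hchars : PySem.Int.toChars numero = Nat.toDigits 10 numero.toNat := by
      unfold PySem.Int.toChars
      simp [show ¬ numero < 0 by omega]
    rw [hchars, pvHorner_eq_phase1 numero.toNat _ le_rfl, hcast,
        pvPhase2A_eq (pvPhase1A numero 0 0).toNat _ le_rfl]
    rw [pvPack]; ring
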